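-- pv_equiv track=rewrite | github.com/wisoniamir/Genesis-FINAL-TRY | orphan_module_restructure_engine.py | add_telemetry_integration
-- ===== SOURCE A (Python) =====
-- def add_telemetry_integration(content: str) -> str:
--     """Add telemetry integration to module"""
--     lines = content.split('\n')
--
--     # Add logging import
--     import_added = False
--     for i, line in enumerate(lines):
--         if line.startswith('import ') or line.startswith('from '):
--             if not import_added:
--                 lines.insert(i, 'import logging')
--                 import_added = True
--                 break
--
--     if not import_added:
--         lines.insert(0, 'import logging')
--
--     return '\n'.join(lines)
-- ===== SOURCE B (Python) =====
-- def add_telemetry_integration(content: str) -> str: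
--     """Add telemetry integration to module"""
--     bol = True  # at start of a line (offset 0 or just after '\n')
--     for p, c in enumerate(content):
--         if bol and (content.startswith('import ', p) or content.startswith('from ', p)):
--             return content[:p] + 'import logging\n' + content[p:]
--         bol = c == '\n'
--     return 'import logging\n' + content
-- ===== Notes on version B (the rewrite author's own statement) =====
-- stated objective: simpler
-- what changed: B replaces A's split-into-lines / scan-with-insert / join pipeline by a single anchored scan over the raw string (beginning-of-line flag) that splices 'import logging ' at the first matching offset, avoiding the intermediate list of lines.
import Mathlib
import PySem

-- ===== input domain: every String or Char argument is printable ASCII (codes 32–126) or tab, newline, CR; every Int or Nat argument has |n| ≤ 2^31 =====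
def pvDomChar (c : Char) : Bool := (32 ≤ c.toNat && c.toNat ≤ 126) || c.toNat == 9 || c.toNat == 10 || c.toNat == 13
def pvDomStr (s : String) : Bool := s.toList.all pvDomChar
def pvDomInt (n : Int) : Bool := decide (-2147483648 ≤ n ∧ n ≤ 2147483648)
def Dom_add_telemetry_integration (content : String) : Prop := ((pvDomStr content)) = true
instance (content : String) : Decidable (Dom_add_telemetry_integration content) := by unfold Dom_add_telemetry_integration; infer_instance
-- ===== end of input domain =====

-- B replaces A's split-into-lines / insert / join pipeline by a single anchored scan over the
-- raw string that splices 'import logging\n' at the first line-start offset matching an import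
-- (objective: simpler — one pass over the characters, no intermediate list of lines).

-- ===== PORT A =====
-- line.startswith('import ') or line.startswith('from ')
def aMatch (line : List Char) : Bool :=
  PySem.Chars.startswith line "import ".toList || PySem.Chars.startswith line "from ".toList

-- the for-loop: insert 'import logging' before the first matching line and break (none = no match)
def aLoop : List (List Char) → Option (List (List Char))
  | [] => none
  | l :: rest =>
    if aMatch l then some ("import logging".toList :: l :: rest)
    else (aLoop rest).map (l :: ·)

def add_telemetry_integration (content : String) : String :=
  let lines := PySem.Chars.splitOn content.toList ['\n']
  match aLoop lines with
  | some lines' => String.mk (PySem.Chars.join ['\n'] lines')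
  | none => String.mk (PySem.Chars.join ['\n'] ("import logging".toList :: lines))

-- ===== PORT B =====
-- content.startswith('import ', p) or content.startswith('from ', p), on the suffix at p
def bMatch (cs : List Char) : Bool :=
  PySem.Chars.startswith cs "import ".toList || PySem.Chars.startswith cs "from ".toList

-- the for-loop over (p, c) with the beginning-of-line flag; returns the splice offset
def bSearch : List Char → Nat → Bool → Option Nat
  | [], _, _ => none
  | c :: rest, p, bol =>
    if bol && bMatch (c :: rest) then some p
    else bSearch rest (p + 1) (c == '\n')

def add_telemetry_integration_alt (content : String) : String :=
  let cs := content.toList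
  match bSearch cs 0 true with
  | some p => String.mk (cs.take p ++ "import logging\n".toList ++ cs.drop p)
  | none => String.mk ("import logging\n".toList ++ cs)

-- ===== PRECONDITION & SPEC =====
def Spec_add_telemetry_integration (content : String) (out : String) : Prop := out = add_telemetry_integration_alt content
instance (content : String) (out : String) : Decidable (Spec_add_telemetry_integration content out) := by unfold Spec_add_telemetry_integration; infer_instance

-- ===== CLAIM (what is proved, stated in full; the proofs are below) =====
def Claim_equal_add_telemetry_integration : Prop := ∀ (content : String), Dom_add_telemetry_integration content → Spec_add_telemetry_integration content (add_telemetry_integration content)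

-- ===== LEMMAS AND PROOFS =====

-- simple splitter on '\n' used to characterise PySem.Chars.splitOn
def mySplit : List Char → List (List Char)
  | [] => [[]]
  | c :: rest =>
    if c = '\n' then [] :: mySplit rest
    else
      match mySplit rest with
      | [] => [[c]]
      | h :: t => (c :: h) :: t

def consHead (pre : List Char) : List (List Char) → List (List Char)
  | [] => [pre]
  | h :: t => (pre ++ h) :: t

theorem mySplit_ne_nil (cs : List Char) : mySplit cs ≠ [] := by
  cases cs with
  | nil => simp [mySplit]
  | cons c rest =>
    simp only [mySplit]
    split
    · simp
    · split <;> simp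

theorem mySplit_nl (rest : List Char) : mySplit ('\n' :: rest) = [] :: mySplit rest := by
  simp [mySplit]

theorem mySplit_cons_ne {c : Char} (hc : ¬ c = '\n') (rest : List Char) {h : List Char}
    {t : List (List Char)} (hm : mySplit rest = h :: t) : mySplit (c :: rest) = (c :: h) :: t := by
  simp [mySplit, hc, hm]

theorem go_eq (fuel : Nat) (l cur : List Char) (acc : List (List Char)) (h : l.length < fuel) :
    PySem.Chars.splitOn.go ['\n'] fuel l cur acc = acc.reverse ++ consHead cur.reverse (mySplit l) := by
  induction fuel generalizing l cur acc with
  | zero => omega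
  | succ n ih =>
    cases l with
    | nil => simp [PySem.Chars.splitOn.go, mySplit, consHead]
    | cons c rest =>
      by_cases hc : c = '\n'
      · subst hc
        have hp : List.isPrefixOf ['\n'] ('\n' :: rest) = true := by simp [List.isPrefixOf]
        simp only [PySem.Chars.splitOn.go, hp, if_pos]
        have hdrop : List.drop (['\n'] : List Char).length ('\n' :: rest) = rest := rfl
        rw [hdrop, ih rest [] (cur.reverse :: acc) (by simp at h ⊢; omega)]
        rw [mySplit_nl]
        rcases hm : mySplit rest with _ | ⟨b, t⟩
        · exact absurd hm (mySplit_ne_nil rest)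
        · simp [consHead]
      · have hp : List.isPrefixOf ['\n'] (c :: rest) = false := by
          simp [List.isPrefixOf]; exact fun hh => absurd hh.symm hc
        simp only [PySem.Chars.splitOn.go, hp, Bool.false_eq_true, if_neg, not_false_iff]
        rw [ih rest (c :: cur) acc (by simp at h ⊢; omega)]
        rcases hm : mySplit rest with _ | ⟨b, t⟩
        · exact absurd hm (mySplit_ne_nil rest)
        · rw [mySplit_cons_ne hc rest hm]
          simp [consHead]

theorem splitOn_eq (cs : List Char) : PySem.Chars.splitOn cs ['\n'] = mySplit cs := by
  unfold PySem.Chars.splitOn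
  rw [go_eq (cs.length + 1) cs [] [] (by omega)]
  rcases hm : mySplit cs with _ | ⟨b, t⟩
  · exact absurd hm (mySplit_ne_nil cs)
  · simp [consHead]

theorem join_cons {L : List Char} {M : List (List Char)} (hM : M ≠ []) :
    PySem.Chars.join ['\n'] (L :: M) = L ++ '\n' :: PySem.Chars.join ['\n'] M := by
  cases M with
  | nil => exact absurd rfl hM
  | cons b t => rw [PySem.Chars.join_cons_cons]; simp

theorem join_mySplit (cs : List Char) : PySem.Chars.join ['\n'] (mySplit cs) = cs := by
  induction cs with
  | nil => simp [mySplit, PySem.Chars.join_singleton]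
  | cons c rest ih =>
    by_cases hc : c = '\n'
    · subst hc
      rw [mySplit_nl, join_cons (mySplit_ne_nil rest), ih]
      simp
    · rcases hm : mySplit rest with _ | ⟨b, t⟩
      · exact absurd hm (mySplit_ne_nil rest)
      · rw [mySplit_cons_ne hc rest hm]
        rw [hm] at ih
        cases t with
        | nil =>
          rw [PySem.Chars.join_singleton] at ih ⊢
          simp [ih]
        | cons b' t' =>
          rw [PySem.Chars.join_cons_cons] at ih ⊢
          simpa using ih

theorem mySplit_no_nl {cs : List Char} (h : '\n' ∉ cs) : mySplit cs = [cs] := by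
  induction cs with
  | nil => rfl
  | cons c rest ih =>
    simp only [List.mem_cons, not_or] at h
    simp [mySplit, Ne.symm h.1, ih h.2]

theorem mySplit_append {L rest : List Char} (h : '\n' ∉ L) :
    mySplit (L ++ '\n' :: rest) = L :: mySplit rest := by
  induction L with
  | nil => simp [mySplit]
  | cons a L' ih =>
    simp only [List.mem_cons, not_or] at h
    simp only [List.cons_append, mySplit, if_neg (Ne.symm h.1), ih h.2]

theorem prefix_append_nl {pat L rest : List Char} (hp : '\n' ∉ pat) :
    pat <+: (L ++ '\n' :: rest) ↔ pat <+: L := by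
  induction L generalizing pat with
  | nil =>
    constructor
    · intro h
      cases pat with
      | nil => exact List.nil_prefix
      | cons a p' =>
        simp only [List.nil_append, List.cons_prefix_cons] at h
        exact absurd (h.1 ▸ List.mem_cons_self) hp
    · intro h
      rw [List.prefix_nil.mp h]
      exact List.nil_prefix
  | cons x L' ih =>
    cases pat with
    | nil => simp
    | cons a p' =>
      simp only [List.mem_cons, not_or] at hp
      simp only [List.cons_append, List.cons_prefix_cons]
      exact and_congr_right fun _ => ih hp.2

theorem startswith_append_nl {pat L rest : List Char} (hp : '\n' ∉ pat) :
    PySem.Chars.startswith (L ++ '\n' :: rest) pat = PySem.Chars.startswith L pat := by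
  rw [Bool.eq_iff_iff, PySem.Chars.startswith_iff, PySem.Chars.startswith_iff]
  exact prefix_append_nl hp

theorem bMatch_append {L rest : List Char} : bMatch (L ++ '\n' :: rest) = aMatch L := by
  unfold bMatch aMatch
  rw [startswith_append_nl (by decide), startswith_append_nl (by decide)]

theorem bMatch_eq_aMatch (cs : List Char) : bMatch cs = aMatch cs := rfl

theorem aMatch_ne_nil {cs : List Char} (h : aMatch cs = true) : cs ≠ [] := by
  intro hnil
  subst hnil
  simp [aMatch, PySem.Chars.startswith_iff, List.prefix_nil] at h

theorem bSearch_shift (cs : List Char) (p : Nat) (bol : Bool) :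
    bSearch cs p bol = (bSearch cs 0 bol).map (· + p) := by
  induction cs generalizing p bol with
  | nil => simp [bSearch]
  | cons c rest ih =>
    simp only [bSearch]
    split
    · simp
    · rw [ih (p + 1), ih 1, Option.map_map]
      congr 1
      funext q
      simp; omega

theorem bSearch_noBol {xs : List Char} (h : '\n' ∉ xs) (p : Nat) : bSearch xs p false = none := by
  induction xs generalizing p with
  | nil => rfl
  | cons c rest ih =>
    simp only [List.mem_cons, not_or] at h
    simp only [bSearch, Bool.false_and, Bool.false_eq_true, if_neg, not_false_iff]
    rw [show (c == '\n') = false from beq_eq_false_iff_ne.mpr (fun hh => h.1 hh.symm), ih h.2]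

theorem bSearch_nl_skip {L : List Char} (h : '\n' ∉ L) (rest : List Char) (p : Nat) :
    bSearch (L ++ '\n' :: rest) p false = bSearch rest (p + L.length + 1) true := by
  induction L generalizing p with
  | nil => simp [bSearch]
  | cons a L' ih =>
    simp only [List.mem_cons, not_or] at h
    simp only [List.cons_append, bSearch, Bool.false_and, Bool.false_eq_true, if_neg,
      not_false_iff]
    rw [show (a == '\n') = false from beq_eq_false_iff_ne.mpr (fun hh => h.1 hh.symm), ih h.2]
    congr 1
    simp; omega

theorem exists_first_nl {cs : List Char} (h : '\n' ∈ cs) :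
    ∃ L rest, cs = L ++ '\n' :: rest ∧ '\n' ∉ L := by
  induction cs with
  | nil => simp at h
  | cons c rest ih =>
    by_cases hc : c = '\n'
    · exact ⟨[], rest, by simp [hc], by simp⟩
    · have : '\n' ∈ rest := by
        rcases List.mem_cons.mp h with h1 | h1
        · exact absurd h1.symm hc
        · exact h1
      obtain ⟨L, r, hr, hL⟩ := ih this
      exact ⟨c :: L, r, by simp [hr],
        by simp only [List.mem_cons, not_or]; exact ⟨fun hh => hc hh.symm, hL⟩⟩

theorem take_shift (L : List Char) (x : Char) (rest : List Char) (p : Nat) :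
    (L ++ x :: rest).take (L.length + 1 + p) = L ++ x :: rest.take p := by
  induction L with
  | nil =>
    rw [show ([] : List Char).length + 1 + p = p + 1 by simp only [List.length_nil]; omega]
    simp [List.take_succ_cons]
  | cons a L' ih =>
    rw [show (a :: L').length + 1 + p = (L'.length + 1 + p) + 1 by simp only [List.length_cons]; omega]
    simp only [List.cons_append, List.take_succ_cons, ih]

theorem drop_shift (L : List Char) (x : Char) (rest : List Char) (p : Nat) :
    (L ++ x :: rest).drop (L.length + 1 + p) = rest.drop p := by
  induction L with
  | nil =>
    rw [show ([] : List Char).length + 1 + p = p + 1 by simp only [List.length_nil]; omega]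
    simp [List.drop_succ_cons]
  | cons a L' ih =>
    rw [show (a :: L').length + 1 + p = (L'.length + 1 + p) + 1 by simp only [List.length_cons]; omega]
    simp only [List.cons_append, List.drop_succ_cons, ih]

-- the joint invariant of the two searches
def RelP (cs : List Char) : Prop :=
  (aLoop (mySplit cs) = none ∧ bSearch cs 0 true = none) ∨
  (∃ p M, bSearch cs 0 true = some p ∧ aLoop (mySplit cs) = some M ∧ M ≠ [] ∧
    PySem.Chars.join ['\n'] M = cs.take p ++ "import logging\n".toList ++ cs.drop p)

theorem insNL_eq : "import logging\n".toList = "import logging".toList ++ ['\n'] := by decide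

theorem REL (cs : List Char) : RelP cs := by
  suffices H : ∀ n (cs : List Char), cs.length ≤ n → RelP cs from H cs.length cs le_rfl
  intro n
  induction n with
  | zero =>
    intro cs hlen
    have : cs = [] := List.length_eq_zero_iff.mp (Nat.le_zero.mp hlen)
    subst this
    unfold RelP
    left
    constructor
    · simp [mySplit, aLoop, aMatch, PySem.Chars.startswith_iff, List.prefix_nil]
    · rfl
  | succ n ih =>
    intro cs hlen
    by_cases hnl : '\n' ∈ cs
    · obtain ⟨L, rest, hcs, hL⟩ := exists_first_nl hnl
      subst hcs
      unfold RelP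
      rw [mySplit_append hL]
      by_cases hm : aMatch L = true
      · right
        refine ⟨0, "import logging".toList :: L :: mySplit rest, ?_, ?_, by simp, ?_⟩
        · rcases hne : (L ++ '\n' :: rest) with _ | ⟨c, cs'⟩
          · cases L <;> simp at hne
          · rw [← hne]
            rw [hne]
            simp only [bSearch]
            rw [← hne, show bMatch (L ++ '\n' :: rest) = true from bMatch_append.trans hm]
            simp
        · simp only [aLoop, hm, if_pos]
        · rw [join_cons (by simp), join_cons (mySplit_ne_nil rest), join_mySplit]
          simp [insNL_eq]
      · have hloop : aLoop (L :: mySplit rest) = (aLoop (mySplit rest)).map (L :: ·) := by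
          simp [aLoop, hm]
        have hsearch : bSearch (L ++ '\n' :: rest) 0 true
            = (bSearch rest 0 true).map (· + (L.length + 1)) := by
          cases L with
          | nil =>
            simp only [List.nil_append, bSearch]
            rw [show bMatch ('\n' :: rest) = false from (bMatch_append (L := [])).trans
              (by simpa using hm)]
            simp only [Bool.and_false, Bool.false_eq_true, if_neg, not_false_iff, beq_self_eq_true]
            rw [bSearch_shift]
            simp
          | cons a L' =>
            simp only [List.mem_cons, not_or] at hL
            simp only [List.cons_append, bSearch]
            rw [show bMatch (a :: (L' ++ '\n' :: rest)) = false by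
              have := bMatch_append (L := a :: L') (rest := rest)
              simp only [List.cons_append] at this
              rw [this]; simpa using hm]
            simp only [Bool.and_false, Bool.false_eq_true, if_neg, not_false_iff]
            rw [show (a == '\n') = false from beq_eq_false_iff_ne.mpr (fun hh => hL.1 hh.symm),
              bSearch_nl_skip hL.2, bSearch_shift]
            simp only [List.length_cons]
            congr 1
            funext q
            simp; omega
        have hrest : rest.length ≤ n := by
          have := hlen
          simp only [List.length_append, List.length_cons] at this
          omega
        rcases ih rest hrest with ⟨ha, hb⟩ | ⟨p, M, hb, ha, hMne, hj⟩
        · left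
          rw [hloop, hsearch, ha, hb]
          simp
        · right
          refine ⟨p + (L.length + 1), L :: M, ?_, ?_, by simp, ?_⟩
          · rw [hsearch, hb]; rfl
          · rw [hloop, ha]; rfl
          · rw [join_cons hMne, hj]
            rw [show p + (L.length + 1) = L.length + 1 + p by omega]
            rw [take_shift, drop_shift]
            simp
    · -- single line, no '\n'
      unfold RelP
      rw [mySplit_no_nl hnl]
      by_cases hm : aMatch cs = true
      · right
        refine ⟨0, ["import logging".toList, cs], ?_, ?_, by simp, ?_⟩
        · rcases hne : cs with _ | ⟨c, cs'⟩
          · exact absurd hne (aMatch_ne_nil hm)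
          · simp only [bSearch]
            rw [← hne, show bMatch cs = true from (bMatch_eq_aMatch cs).trans hm]
            simp
        · simp [aLoop, hm]
        · rw [PySem.Chars.join_cons_cons, PySem.Chars.join_singleton]
          simp [insNL_eq]
      · left
        constructor
        · simp [aLoop, hm]
        · rcases hne : cs with _ | ⟨c, cs'⟩
          · rfl
          · simp only [bSearch]
            rw [← hne, show bMatch cs = false by rw [bMatch_eq_aMatch]; simpa using hm]
            have hc : c ≠ '\n' := fun hh => hnl (hne ▸ (hh ▸ List.mem_cons_self))
            have hcs' : '\n' ∉ cs' := fun hh => hnl (hne ▸ List.mem_cons_of_mem _ hh)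
            rw [if_neg (by simp), show (c == '\n') = false from beq_eq_false_iff_ne.mpr hc]
            exact bSearch_noBol hcs' (0 + 1)

-- ===== VERDICT (by name: the statement is the Claim_ definition above) =====
theorem add_telemetry_integration_spec : Claim_equal_add_telemetry_integration := by
  intro content _
  unfold Spec_add_telemetry_integration
  unfold add_telemetry_integration add_telemetry_integration_alt
  simp only
  rw [splitOn_eq]
  rcases REL content.toList with ⟨ha, hb⟩ | ⟨p, M, hb, ha, _, hj⟩
  · rw [ha, hb]
    simp only
    rw [join_cons (mySplit_ne_nil _), join_mySplit]
    simp [insNL_eq]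
  · rw [ha, hb]
    simp only
    rw [hj]
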